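-- pv_equiv track=rewrite | github.com/sustainet-guardian/aletheia-probe | src/aletheia_probe/updater/sources/pubmed.py | _parse_nlm_records
-- ===== SOURCE A (Python) =====
-- _RECORD_DELIMITER = "--------------------------------------------------------"
--
-- def _parse_nlm_records(text: str) -> list[dict[str, str]]:
--     """Parse NLM journal list flat-file text into field dictionaries.
--
--     Each record is delimited by a line of dashes. Fields are ``Key: Value``
--     pairs, one per line.
--
--     Args:
--         text: Raw text content of the NLM flat file.
--
--     Returns:
--         List of dicts, one per journal record, with raw string values.
--     """
--     records: list[dict[str, str]] = []
--     current: dict[str, str] = {}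
--
--     for line in text.splitlines():
--         stripped = line.strip()
--         if stripped == _RECORD_DELIMITER:
--             if current:
--                 records.append(current)
--                 current = {}
--             continue
--
--         if ":" in stripped:
--             key, _, value = stripped.partition(":")
--             current[key.strip()] = value.strip()
--
--     if current:
--         records.append(current)
--
--     return records
-- ===== SOURCE B (Python) =====
-- _RECORD_DELIMITER = "--------------------------------------------------------"
--
--
-- def _parse_nlm_records(text: str) -> list[dict[str, str]]:
--     """Segment-then-parse: first cut the lines into record blocks at delimiter
--     lines, then parse each block into a field dict, keeping non-empty ones."""
--     groups: list[list[str]] = []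
--     current_lines: list[str] = []
--     for line in text.splitlines():
--         if line.strip() == _RECORD_DELIMITER:
--             groups.append(current_lines)
--             current_lines = []
--         else:
--             current_lines.append(line)
--     groups.append(current_lines)
--
--     parsed = [_parse_group(g) for g in groups]
--     return [d for d in parsed if d]
--
--
-- def _parse_group(lines: list[str]) -> dict[str, str]:
--     fields: dict[str, str] = {}
--     for line in lines:
--         stripped = line.strip()
--         if ":" in stripped:
--             key, _, value = stripped.partition(":")
--             fields[key.strip()] = value.strip()
--     return fields
-- ===== Notes on version B (the rewrite author's own statement) =====
-- stated objective: alternative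
-- what changed: Replaces A's single interleaved accumulator loop (dict built and flushed inline) by a two-phase segment-then-parse decomposition: lines are first cut into record blocks at delimiter lines, then each block is mapped to a field dict and empty dicts are filtered out.
import Mathlib
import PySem

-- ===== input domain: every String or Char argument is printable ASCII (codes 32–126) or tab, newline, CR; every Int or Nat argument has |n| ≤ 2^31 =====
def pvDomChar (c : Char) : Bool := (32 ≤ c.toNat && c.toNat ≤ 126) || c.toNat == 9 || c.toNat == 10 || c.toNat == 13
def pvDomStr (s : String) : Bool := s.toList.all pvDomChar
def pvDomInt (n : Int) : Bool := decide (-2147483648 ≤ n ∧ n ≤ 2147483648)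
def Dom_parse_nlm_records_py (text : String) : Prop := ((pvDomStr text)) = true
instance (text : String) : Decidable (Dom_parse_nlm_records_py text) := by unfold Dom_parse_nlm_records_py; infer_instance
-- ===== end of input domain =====

-- B replaces A's interleaved accumulator loop by a two-phase segment-then-parse
-- decomposition (cut lines into blocks at delimiter lines, then parse each block
-- and drop empty dicts); same cost, different structure.


-- ===== PORT A =====

def pvDelim : String := "--------------------------------------------------------"

-- hand port of str.partition(":") (PySem has no partition): exact — splits at the
-- first ':' ; when ':' is absent it returns (s, "") which matches Python's
-- (s, '', '') on the components the programs use (they only use it when ':' ∈ s).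
def pvPartColon : List Char → List Char × List Char
  | [] => ([], [])
  | c :: rest =>
      if c = ':' then ([], rest)
      else
        let p := pvPartColon rest
        (c :: p.1, p.2)

-- the shared per-line field update: "if ':' in stripped: key,_,value = stripped.partition(':'); d[key.strip()] = value.strip()"
def pvFieldStep (d : PySem.Dict String String) (line : String) : PySem.Dict String String :=
  let stripped := PySem.Str.strip line
  if PySem.Str.isIn ":" stripped then
    let p := pvPartColon stripped.toList
    d.insert (PySem.Str.strip (String.ofList p.1)) (PySem.Str.strip (String.ofList p.2))
  else d

def parse_nlm_records_py (text : String) : List (List (String × String)) :=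
  let st := (PySem.Str.splitlines text).foldl
    (fun (st : List (List (String × String)) × PySem.Dict String String) (line : String) =>
      let stripped := PySem.Str.strip line
      if stripped = pvDelim then
        if st.2.items = [] then st else (st.1 ++ [st.2.items], PySem.Dict.empty)
      else
        (st.1, pvFieldStep st.2 line))
    ([], PySem.Dict.empty)
  if st.2.items = [] then st.1 else st.1 ++ [st.2.items]

-- ===== PORT B =====

def pvParseGroup (lines : List String) : List (String × String) :=
  (lines.foldl pvFieldStep PySem.Dict.empty).items

def parse_nlm_records_py_alt (text : String) : List (List (String × String)) :=
  let st := (PySem.Str.splitlines text).foldl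
    (fun (st : List (List String) × List String) (line : String) =>
      if PySem.Str.strip line = pvDelim then (st.1 ++ [st.2], [])
      else (st.1, st.2 ++ [line]))
    ([], [])
  let groups := st.1 ++ [st.2]
  (groups.map pvParseGroup).filter (fun d => d ≠ [])

-- ===== PRECONDITION & SPEC =====
def Spec_parse_nlm_records_py (text : String) (out : List (List (String × String))) : Prop := out = parse_nlm_records_py_alt text
instance (text : String) (out : List (List (String × String))) : Decidable (Spec_parse_nlm_records_py text out) := by unfold Spec_parse_nlm_records_py; infer_instance

-- ===== CLAIM (what is proved, stated in full; the proofs are below) =====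
def Claim_equal_parse_nlm_records_py : Prop := ∀ (text : String), Dom_parse_nlm_records_py text → Spec_parse_nlm_records_py text (parse_nlm_records_py text)

-- ===== LEMMAS AND PROOFS =====

-- abbreviations for the two loop bodies (proof-side only)
def pvStepA (st : List (List (String × String)) × PySem.Dict String String) (line : String) :
    List (List (String × String)) × PySem.Dict String String :=
  let stripped := PySem.Str.strip line
  if stripped = pvDelim then
    if st.2.items = [] then st else (st.1 ++ [st.2.items], PySem.Dict.empty)
  else
    (st.1, pvFieldStep st.2 line)

def pvStepB (st : List (List String) × List String) (line : String) :
    List (List String) × List String :=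
  if PySem.Str.strip line = pvDelim then (st.1 ++ [st.2], [])
  else (st.1, st.2 ++ [line])

def pvDictOf (cur : List String) : PySem.Dict String String :=
  cur.foldl pvFieldStep PySem.Dict.empty

def pvFinishA (st : List (List (String × String)) × PySem.Dict String String) :
    List (List (String × String)) :=
  if st.2.items = [] then st.1 else st.1 ++ [st.2.items]

-- B's group accumulator only ever appends to the group list
lemma pvStepB_prefix (ls : List String) (g0 gs : List (List String)) (cur : List String) :
    ls.foldl pvStepB (g0 ++ gs, cur)
      = (g0 ++ (ls.foldl pvStepB (gs, cur)).1, (ls.foldl pvStepB (gs, cur)).2) := by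
  induction ls generalizing gs cur with
  | nil => simp
  | cons l ls ih =>
      simp only [List.foldl_cons, pvStepB]
      by_cases h : PySem.Str.strip l = pvDelim
      · simp only [h]
        rw [List.append_assoc] at *
        exact ih (gs ++ [cur]) []
      · simp only [h]
        exact ih gs (cur ++ [l])

-- the core invariant: A's flushed state equals B's grouped-then-parsed result
lemma pvMain (ls : List String) (recs : List (List (String × String))) (cur : List String) :
    pvFinishA (ls.foldl pvStepA (recs, pvDictOf cur))
      = recs ++ ((((ls.foldl pvStepB ([], cur)).1 ++ [(ls.foldl pvStepB ([], cur)).2]).map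
          pvParseGroup).filter (fun d => d ≠ [])) := by
  induction ls generalizing recs cur with
  | nil =>
      by_cases h : (List.foldl pvFieldStep PySem.Dict.empty cur).items = []
      · simp [pvFinishA, pvParseGroup, pvDictOf, h]
      · simp [pvFinishA, pvParseGroup, pvDictOf, h]
  | cons l ls ih =>
      simp only [List.foldl_cons, pvStepA, pvStepB]
      by_cases h : PySem.Str.strip l = pvDelim
      · rw [if_pos h, if_pos h]
        have hB := pvStepB_prefix ls [cur] [] []
        simp only [List.append_nil] at hB
        simp only [List.nil_append]
        rw [hB]
        by_cases he : (pvDictOf cur).items = []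
        · rw [if_pos he]
          have hd : pvDictOf cur = pvDictOf [] := by
            apply PySem.Dict.ext; simpa [pvDictOf, PySem.Dict.empty] using he
          have hpg : pvParseGroup cur = [] := by simpa [pvParseGroup, pvDictOf] using he
          rw [hd, ih recs []]
          simp [hpg]
        · rw [if_neg he]
          rw [show (PySem.Dict.empty : PySem.Dict String String) = pvDictOf [] from rfl]
          rw [ih (recs ++ [(pvDictOf cur).items]) []]
          have hpg : pvParseGroup cur = (pvDictOf cur).items := rfl
          simp [hpg, he]
      · rw [if_neg h, if_neg h]
        have hc : pvFieldStep (pvDictOf cur) l = pvDictOf (cur ++ [l]) := by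
          simp [pvDictOf]
        rw [hc]
        exact ih recs (cur ++ [l])

-- ===== VERDICT (by name: the statement is the Claim_ definition above) =====
theorem parse_nlm_records_py_spec : Claim_equal_parse_nlm_records_py := by
  intro text _
  unfold Spec_parse_nlm_records_py parse_nlm_records_py parse_nlm_records_py_alt
  have := pvMain (PySem.Str.splitlines text) [] []
  simp only [pvDictOf, List.foldl_nil, List.nil_append] at this
  exact this
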